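-- pv_equiv track=rewrite | github.com/keithhenning/technical-interviews | data structures and algorithms/python/08_024.py | flood_fill_time
-- ===== SOURCE A (Python) =====
-- from collections import deque
--
-- def flood_fill_time(maze, startX, startY, targetX, targetY):
--    rows, cols = len(maze), len(maze[0])
--    visited = [[False for _ in range(cols)] for _ in range(rows)]
--
--    # BFS queue with (x, y, time)
--    queue = deque([(startX, startY, 0)])
--    visited[startX][startY] = True
--
--    directions = [(1, 0), (-1, 0), (0, 1), (0, -1)]
--
--    while queue:
--       x, y, time = queue.popleft()
--
--       # If water reaches target
--       if x == targetX and y == targetY: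
--          return time
--
--       for dx, dy in directions:
--          nx, ny = x + dx, y + dy
--
--          # Check if new position is valid
--          if (0 <= nx < rows and 0 <= ny < cols and
--              not visited[nx][ny] and maze[nx][ny] == 0):
--             visited[nx][ny] = True
--             queue.append((nx, ny, time + 1))
--
--    return -1
-- ===== SOURCE B (Python) =====
-- def flood_fill_time(maze, startX, startY, targetX, targetY):
--     rows, cols = len(maze), len(maze[0])
--     visited = [[False] * cols for _ in range(rows)]
--     visited[startX][startY] = True
--     frontier = [(startX, startY)]
--     time = 0
--     while frontier:
--         if any(x == targetX and y == targetY for (x, y) in frontier):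
--             return time
--         nxt = []
--         for (x, y) in frontier:
--             for nx, ny in ((x + 1, y), (x - 1, y), (x, y + 1), (x, y - 1)):
--                 if (0 <= nx < rows and 0 <= ny < cols
--                         and not visited[nx][ny] and maze[nx][ny] == 0):
--                     visited[nx][ny] = True
--                     nxt.append((nx, ny))
--         frontier = nxt
--         time += 1
--     return -1
-- ===== Notes on version B (the rewrite author's own statement) =====
-- stated objective: alternative
-- what changed: Replaced the FIFO queue of (x,y,time) triples by a level-synchronous BFS: a frontier list expanded one whole level per iteration of an outer loop that carries a single time counter, checking the frontier for the target before each expansion.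
-- outside the precondition, e.g. on flood_fill_time([[0, 1], [1]], 0, 0, 0, 0): A returns 0, B returns 0; on flood_fill_time([[0, 0], [0]], 0, 0, 1, 1): A raises IndexError, B raises IndexError
import Mathlib
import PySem

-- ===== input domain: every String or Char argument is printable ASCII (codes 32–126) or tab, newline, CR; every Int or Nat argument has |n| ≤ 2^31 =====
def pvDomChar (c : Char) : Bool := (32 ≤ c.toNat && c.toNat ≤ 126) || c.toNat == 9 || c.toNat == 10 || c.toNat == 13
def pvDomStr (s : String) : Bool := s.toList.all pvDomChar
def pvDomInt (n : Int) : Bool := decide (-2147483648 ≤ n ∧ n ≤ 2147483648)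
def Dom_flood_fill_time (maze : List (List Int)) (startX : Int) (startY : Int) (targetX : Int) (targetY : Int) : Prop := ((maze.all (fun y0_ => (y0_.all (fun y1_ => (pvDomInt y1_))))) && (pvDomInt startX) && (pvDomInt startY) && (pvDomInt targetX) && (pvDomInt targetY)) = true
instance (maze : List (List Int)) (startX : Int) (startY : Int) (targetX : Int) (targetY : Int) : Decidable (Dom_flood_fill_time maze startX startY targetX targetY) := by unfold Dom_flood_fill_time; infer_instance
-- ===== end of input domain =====

-- B replaces A's FIFO queue of (x,y,time) triples and boolean visited matrix by a
-- level-synchronous BFS (a frontier expanded one whole level per outer iteration, a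
-- single time counter, visited as a set of coordinates): an alternative decomposition
-- of the same O(rows*cols) search, equal on the stated precondition.

-- ===== PORT A =====
-- One neighbour probe of A's inner `for dx, dy in directions` loop: acc = (cells
-- enqueued so far for this pop, visited so far); marks visited as Python does.
def pvNbrsStep (maze : List (List Int)) (rows cols x y : Int)
    (acc : List (Int × Int) × List (Int × Int)) (d : Int × Int) :
    List (Int × Int) × List (Int × Int) :=
  let nx := x + d.1
  let ny := y + d.2
  if 0 ≤ nx ∧ nx < rows ∧ 0 ≤ ny ∧ ny < cols ∧ (nx, ny) ∉ acc.2 ∧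
      (PySem.List.pyGet? (PySem.List.pyGetD maze nx []) ny) = some 0 then
    (acc.1 ++ [(nx, ny)], acc.2 ++ [(nx, ny)])
  else acc

-- A's body of one `queue.popleft()`: the four directions, in A's order.
def pvExpandCell (maze : List (List Int)) (rows cols : Int)
    (v : List (Int × Int)) (x y : Int) : List (Int × Int) × List (Int × Int) :=
  [((1 : Int), (0 : Int)), (-1, 0), (0, 1), (0, -1)].foldl (pvNbrsStep maze rows cols x y) ([], v)

-- A's `while queue` loop; the visited matrix is carried as the set of True cells
-- (exact on Pre_, where every index written or tested is in range). Fuel is a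
-- totality guard only: rows*cols+2 provably never runs out (each enqueue marks a
-- new cell visited), see pvLoopA_total below.
def pvLoopA (maze : List (List Int)) (tX tY rows cols : Int) :
    Nat → List (Int × Int × Int) → List (Int × Int) → Option Int
  | 0, _, _ => none
  | _ + 1, [], _ => some (-1)
  | f + 1, (x, y, t) :: q, v =>
    if x = tX ∧ y = tY then some t
    else
      let p := pvExpandCell maze rows cols v x y
      pvLoopA maze tX tY rows cols f (q ++ p.1.map (fun c => (c.1, c.2, t + 1))) p.2

-- `visited[startX][startY] = True`: Python's negative-index write lands on the
-- wrapped cell; in the set-of-True-cells carrier that is the wrapped coordinate.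
def flood_fill_time (maze : List (List Int)) (startX : Int) (startY : Int) (targetX : Int) (targetY : Int) : Int :=
  let rows : Int := maze.length
  let cols : Int := (maze.headD []).length
  let wX : Int := if startX < 0 then startX + rows else startX
  let wY : Int := if startY < 0 then startY + cols else startY
  match pvLoopA maze targetX targetY rows cols (maze.length * (maze.headD []).length + 2)
      [(startX, startY, 0)] [(wX, wY)] with
  | some r => r
  | none => -1

-- ===== PORT B =====
-- B's inner `for (x, y) in frontier` loop body: expand one frontier cell (its four
-- neighbours, same order), acc = (next frontier so far, visited so far).
def pvLevelStep (maze : List (List Int)) (rows cols : Int)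
    (acc : List (Int × Int) × List (Int × Int)) (c : Int × Int) :
    List (Int × Int) × List (Int × Int) :=
  let p := pvExpandCell maze rows cols acc.2 c.1 c.2
  (acc.1 ++ p.1, p.2)

-- B's construction of `nxt` for a whole level.
def pvExpandLevel (maze : List (List Int)) (rows cols : Int)
    (frontier v : List (Int × Int)) : List (Int × Int) × List (Int × Int) :=
  frontier.foldl (pvLevelStep maze rows cols) ([], v)

-- B's `while frontier` loop: check the level for the target, else expand it whole
-- and bump the time. Fuel is a totality guard only (rows*cols+2 never runs out).
def pvLoopB (maze : List (List Int)) (tX tY rows cols : Int) :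
    Nat → List (Int × Int) → List (Int × Int) → Int → Option Int
  | 0, _, _, _ => none
  | _ + 1, [], _, _ => some (-1)
  | f + 1, c :: fr, v, t =>
    if (c :: fr).any (fun c => decide (c.1 = tX ∧ c.2 = tY)) then some t
    else
      let p := pvExpandLevel maze rows cols (c :: fr) v
      pvLoopB maze tX tY rows cols f p.1 p.2 (t + 1)

-- B's `visited[startX][startY] = True` wraps exactly as A's does.
def flood_fill_time_alt (maze : List (List Int)) (startX : Int) (startY : Int) (targetX : Int) (targetY : Int) : Int :=
  let rows : Int := maze.length
  let cols : Int := (maze.headD []).length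
  let wX : Int := if startX < 0 then startX + rows else startX
  let wY : Int := if startY < 0 then startY + cols else startY
  match pvLoopB maze targetX targetY rows cols (maze.length * (maze.headD []).length + 2)
      [(startX, startY)] [(wX, wY)] 0 with
  | some r => r
  | none => -1

-- ===== PRECONDITION & SPEC =====
-- Pre_ excludes only inputs where Python A raises IndexError: an empty maze, a start
-- index outside Python's negative-wraparound range for the visited matrix, or a row
-- shorter than len(maze[0]) that the BFS reaches — the last over-approximated by
-- requiring every row at least that long, so a few returning inputs whose short rows
-- are never reached are excluded too (B returns A's value there as well).
def Pre_flood_fill_time (maze : List (List Int)) (startX : Int) (startY : Int) (targetX : Int) (targetY : Int) : Prop :=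
  maze ≠ [] ∧ (∀ row ∈ maze, (maze.headD []).length ≤ row.length) ∧
  -(maze.length : Int) ≤ startX ∧ startX < (maze.length : Int) ∧
  -((maze.headD []).length : Int) ≤ startY ∧ startY < ((maze.headD []).length : Int)

instance (maze : List (List Int)) (startX : Int) (startY : Int) (targetX : Int) (targetY : Int) : Decidable (Pre_flood_fill_time maze startX startY targetX targetY) := by unfold Pre_flood_fill_time; infer_instance

def pvWitness_flood_fill_time : List (List Int) × Int × Int × Int × Int :=
  ([[0, 0], [0, 0]], 0, 0, 1, 1)

def Spec_flood_fill_time (maze : List (List Int)) (startX : Int) (startY : Int) (targetX : Int) (targetY : Int) (out : Int) : Prop := out = flood_fill_time_alt maze startX startY targetX targetY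
instance (maze : List (List Int)) (startX : Int) (startY : Int) (targetX : Int) (targetY : Int) (out : Int) : Decidable (Spec_flood_fill_time maze startX startY targetX targetY out) := by unfold Spec_flood_fill_time; infer_instance

-- ===== CLAIM (what is proved, stated in full; the proofs are below) =====
def Claim_equal_flood_fill_time : Prop := ∀ (maze : List (List Int)) (startX : Int) (startY : Int) (targetX : Int) (targetY : Int), Dom_flood_fill_time maze startX startY targetX targetY → Pre_flood_fill_time maze startX startY targetX targetY → Spec_flood_fill_time maze startX startY targetX targetY (flood_fill_time maze startX startY targetX targetY)

-- ===== LEMMAS AND PROOFS =====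

-- A cell inside the grid.
def pvInGrid (rows cols : Int) (c : Int × Int) : Prop :=
  0 ≤ c.1 ∧ c.1 < rows ∧ 0 ≤ c.2 ∧ c.2 < cols

theorem pvNbrsStep_fold_spec (maze : List (List Int)) (rows cols x y : Int)
    (ds : List (Int × Int)) : ∀ (a w : List (Int × Int)),
    ∃ t, (ds.foldl (pvNbrsStep maze rows cols x y) (a, w)).1 = a ++ t ∧
      (ds.foldl (pvNbrsStep maze rows cols x y) (a, w)).2 = w ++ t ∧
      (∀ c ∈ t, pvInGrid rows cols c ∧ c ∉ w) ∧
      (w.Nodup → (w ++ t).Nodup) := by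
  induction ds with
  | nil => intro a w; exact ⟨[], by simp⟩
  | cons d ds ih =>
    intro a w
    simp only [List.foldl_cons]
    by_cases h : 0 ≤ x + d.1 ∧ x + d.1 < rows ∧ 0 ≤ y + d.2 ∧ y + d.2 < cols ∧
        (x + d.1, y + d.2) ∉ w ∧
        (PySem.List.pyGet? (PySem.List.pyGetD maze (x + d.1) []) (y + d.2)) = some 0
    · rw [show pvNbrsStep maze rows cols x y (a, w) d
          = (a ++ [(x + d.1, y + d.2)], w ++ [(x + d.1, y + d.2)]) by
        simp [pvNbrsStep, h]]
      obtain ⟨t, h1, h2, h3, h4⟩ := ih (a ++ [(x + d.1, y + d.2)]) (w ++ [(x + d.1, y + d.2)])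
      refine ⟨(x + d.1, y + d.2) :: t, by simpa using h1, by simpa using h2, ?_, ?_⟩
      · intro c hc
        rcases List.mem_cons.mp hc with hc | hc
        · subst hc; exact ⟨⟨h.1, h.2.1, h.2.2.1, h.2.2.2.1⟩, h.2.2.2.2.1⟩
        · obtain ⟨hg, hn⟩ := h3 c hc
          exact ⟨hg, fun hcw => hn (by simp [hcw])⟩
      · intro hw
        have : (w ++ [(x + d.1, y + d.2)]).Nodup := by
          simp [List.nodup_append, hw]
          intro a b hab ha hb
          exact h.2.2.2.2.1 (ha ▸ hb ▸ hab)
        simpa [List.append_assoc] using h4 this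
    · rw [show pvNbrsStep maze rows cols x y (a, w) d = (a, w) by
        simp only [pvNbrsStep]; rw [if_neg h]]
      exact ih a w

theorem pvExpandCell_spec (maze : List (List Int)) (rows cols : Int)
    (v : List (Int × Int)) (x y : Int) :
    (pvExpandCell maze rows cols v x y).2 = v ++ (pvExpandCell maze rows cols v x y).1 ∧
      (∀ c ∈ (pvExpandCell maze rows cols v x y).1, pvInGrid rows cols c ∧ c ∉ v) ∧
      (v.Nodup → (pvExpandCell maze rows cols v x y).2.Nodup) := by
  obtain ⟨t, h1, h2, h3, h4⟩ := pvNbrsStep_fold_spec maze rows cols x y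
    [((1 : Int), (0 : Int)), (-1, 0), (0, 1), (0, -1)] [] v
  unfold pvExpandCell
  rw [h1, h2]
  exact ⟨by simp, by simpa using h3, h4⟩

theorem pvLevelFold_spec (maze : List (List Int)) (rows cols : Int)
    (fr : List (Int × Int)) : ∀ (a w : List (Int × Int)),
    ∃ t, (fr.foldl (pvLevelStep maze rows cols) (a, w)).1 = a ++ t ∧
      (fr.foldl (pvLevelStep maze rows cols) (a, w)).2 = w ++ t ∧
      (∀ c ∈ t, pvInGrid rows cols c ∧ c ∉ w) ∧
      (w.Nodup → (w ++ t).Nodup) := by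
  induction fr with
  | nil => intro a w; exact ⟨[], by simp⟩
  | cons c fr ih =>
    intro a w
    simp only [List.foldl_cons]
    obtain ⟨h1, h2, h3⟩ := pvExpandCell_spec maze rows cols w c.1 c.2
    set p := pvExpandCell maze rows cols w c.1 c.2 with hp
    have hstep : pvLevelStep maze rows cols (a, w) c = (a ++ p.1, w ++ p.1) := by
      simp [pvLevelStep, ← hp, h1]
    rw [hstep]
    obtain ⟨t, g1, g2, g3, g4⟩ := ih (a ++ p.1) (w ++ p.1)
    refine ⟨p.1 ++ t, by simpa [List.append_assoc] using g1,
      by simpa [List.append_assoc] using g2, ?_, ?_⟩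
    · intro d hd
      rcases List.mem_append.mp hd with hd | hd
      · exact h2 d hd
      · obtain ⟨hg, hn⟩ := g3 d hd
        exact ⟨hg, fun hdw => hn (by simp [hdw])⟩
    · intro hw
      have := g4 (by rw [← h1]; exact h3 hw)
      simpa [List.append_assoc] using this

theorem pvCard_le (rows cols : Int) (v : List (Int × Int)) (hnd : v.Nodup)
    (hg : ∀ c ∈ v, pvInGrid rows cols c) :
    v.length ≤ rows.toNat * cols.toNat := by
  have hsub : v.toFinset ⊆ (Finset.Icc (0 : Int) (rows - 1)) ×ˢ (Finset.Icc (0 : Int) (cols - 1)) := by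
    intro c hc
    obtain ⟨h1, h2, h3, h4⟩ := hg c (List.mem_toFinset.mp hc)
    simp only [Finset.mem_product, Finset.mem_Icc]
    omega
  have hcard := Finset.card_le_card hsub
  rw [List.toFinset_card_of_nodup hnd] at hcard
  calc v.length ≤ _ := hcard
    _ = rows.toNat * cols.toNat := by
        rw [Finset.card_product, Int.card_Icc, Int.card_Icc]
        congr 1 <;> omega

theorem pvLoopA_total (maze : List (List Int)) (tX tY rows cols : Int) :
    ∀ (f : Nat) (q : List (Int × Int × Int)) (v : List (Int × Int)),
      v.Nodup → (∀ c ∈ v, pvInGrid rows cols c) →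
      q.length + (rows.toNat * cols.toNat - v.length) < f →
      (pvLoopA maze tX tY rows cols f q v).isSome := by
  intro f
  induction f with
  | zero => intro q v _ _ h; omega
  | succ f ih =>
    intro q v hnd hg hm
    match q with
    | [] => simp [pvLoopA]
    | (x, y, t) :: q =>
      rw [pvLoopA]
      by_cases ht : x = tX ∧ y = tY
      · simp [ht]
      · rw [if_neg ht]
        obtain ⟨h1, h2, h3⟩ := pvExpandCell_spec maze rows cols v x y
        set p := pvExpandCell maze rows cols v x y with hp
        have hnd' : p.2.Nodup := h3 hnd
        have hg' : ∀ c ∈ p.2, pvInGrid rows cols c := by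
          intro c hc
          rw [h1] at hc
          rcases List.mem_append.mp hc with hc | hc
          · exact hg c hc
          · exact (h2 c hc).1
        apply ih _ _ hnd' hg'
        have hlen : p.2.length = v.length + p.1.length := by rw [h1]; simp
        have hle : p.2.length ≤ rows.toNat * cols.toNat := pvCard_le rows cols p.2 hnd' hg'
        simp only [List.length_append, List.length_map, List.length_cons] at hm ⊢
        omega

theorem pvLoopB_total (maze : List (List Int)) (tX tY rows cols : Int) :
    ∀ (f : Nat) (fr v : List (Int × Int)) (t : Int),
      v.Nodup → (∀ c ∈ v, pvInGrid rows cols c) →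
      (rows.toNat * cols.toNat - v.length) + 2 ≤ f →
      (pvLoopB maze tX tY rows cols f fr v t).isSome := by
  intro f
  induction f with
  | zero => intro fr v t _ _ h; omega
  | succ f ih =>
    intro fr v t hnd hg hm
    match fr with
    | [] => simp [pvLoopB]
    | c :: fr =>
      rw [pvLoopB]
      by_cases ht : (c :: fr).any (fun c => decide (c.1 = tX ∧ c.2 = tY)) = true
      · rw [if_pos ht]; simp
      · rw [if_neg ht]
        obtain ⟨nt, h1, h2, h3, h4⟩ := pvLevelFold_spec maze rows cols (c :: fr) [] v
        have hE1 : (pvExpandLevel maze rows cols (c :: fr) v).1 = nt := by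
          rw [pvExpandLevel, h1]; simp
        have hE2 : (pvExpandLevel maze rows cols (c :: fr) v).2 = v ++ nt := by
          rw [pvExpandLevel, h2]
        have hnd' : (pvExpandLevel maze rows cols (c :: fr) v).2.Nodup := by
          rw [hE2]; exact h4 hnd
        have hg' : ∀ d ∈ (pvExpandLevel maze rows cols (c :: fr) v).2, pvInGrid rows cols d := by
          intro d hd
          rw [hE2] at hd
          rcases List.mem_append.mp hd with hd | hd
          · exact hg d hd
          · exact (h3 d hd).1
        show (pvLoopB maze tX tY rows cols f (pvExpandLevel maze rows cols (c :: fr) v).1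
          (pvExpandLevel maze rows cols (c :: fr) v).2 (t + 1)).isSome = true
        by_cases hnt : nt = []
        · rw [hE1, hnt]
          match f, hm with
          | f + 1, _ => simp [pvLoopB]
        · apply ih _ _ _ hnd' hg'
          have hlen : (pvExpandLevel maze rows cols (c :: fr) v).2.length
              = v.length + nt.length := by rw [hE2]; simp
          have hle : (pvExpandLevel maze rows cols (c :: fr) v).2.length
              ≤ rows.toNat * cols.toNat := pvCard_le rows cols _ hnd' hg'
          have hnt1 : 1 ≤ nt.length := by
            cases nt with
            | nil => exact absurd rfl hnt
            | cons _ _ => simp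
          omega

theorem pvWithinLevel (maze : List (List Int)) (tX tY rows cols : Int) :
    ∀ (L : List (Int × Int)), ∀ (N : List (Int × Int)) (v : List (Int × Int))
      (tm : Int) (f : Nat) (r : Int),
      pvLoopA maze tX tY rows cols f
          (L.map (fun c => (c.1, c.2, tm)) ++ N.map (fun c => (c.1, c.2, tm + 1))) v = some r →
      ((∃ c ∈ L, c.1 = tX ∧ c.2 = tY) ∧ r = tm) ∨
      ((∀ c ∈ L, ¬(c.1 = tX ∧ c.2 = tY)) ∧
        pvLoopA maze tX tY rows cols (f - L.length)
          ((L.foldl (pvLevelStep maze rows cols) (N, v)).1.map (fun c => (c.1, c.2, tm + 1)))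
          (L.foldl (pvLevelStep maze rows cols) (N, v)).2 = some r) := by
  intro L
  induction L with
  | nil =>
    intro N v tm f r hA
    right
    exact ⟨by simp, by simpa using hA⟩
  | cons c L ih =>
    intro N v tm f r hA
    match f with
    | 0 => simp [pvLoopA] at hA
    | f + 1 =>
      rw [List.map_cons, List.cons_append, pvLoopA] at hA
      by_cases ht : c.1 = tX ∧ c.2 = tY
      · rw [if_pos ht] at hA
        exact Or.inl ⟨⟨c, List.mem_cons_self .., ht⟩, (Option.some_injective _ hA).symm⟩
      · rw [if_neg ht] at hA
        set p := pvExpandCell maze rows cols v c.1 c.2 with hp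
        replace hA : pvLoopA maze tX tY rows cols f
            ((L.map (fun c => (c.1, c.2, tm)) ++ N.map (fun c => (c.1, c.2, tm + 1)))
              ++ p.1.map (fun c => (c.1, c.2, tm + 1))) p.2 = some r := hA
        have hq : (L.map (fun c => (c.1, c.2, tm)) ++ N.map (fun c => (c.1, c.2, tm + 1)))
            ++ p.1.map (fun c => (c.1, c.2, tm + 1))
            = L.map (fun c => (c.1, c.2, tm)) ++ (N ++ p.1).map (fun c => (c.1, c.2, tm + 1)) := by
          simp [List.append_assoc]
        rw [hq] at hA
        rcases ih (N ++ p.1) p.2 tm f r hA with ⟨⟨d, hd, hdt⟩, hr⟩ | ⟨hnt, hrec⟩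
        · exact Or.inl ⟨⟨d, List.mem_cons_of_mem _ hd, hdt⟩, hr⟩
        · refine Or.inr ⟨?_, ?_⟩
          · intro d hd
            rcases List.mem_cons.mp hd with rfl | hd
            · exact ht
            · exact hnt d hd
          · have hfold : (c :: L).foldl (pvLevelStep maze rows cols) (N, v)
                = L.foldl (pvLevelStep maze rows cols) (N ++ p.1, p.2) := by
              rw [List.foldl_cons]; rfl
            rw [hfold]
            simpa [Nat.succ_sub_one] using hrec

theorem pvAtoB (maze : List (List Int)) (tX tY rows cols : Int) :
    ∀ (fB : Nat) (fr v : List (Int × Int)) (tm : Int) (fA : Nat) (r : Int),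
      pvLoopA maze tX tY rows cols fA (fr.map (fun c => (c.1, c.2, tm))) v = some r →
      (pvLoopB maze tX tY rows cols fB fr v tm).isSome →
      pvLoopB maze tX tY rows cols fB fr v tm = some r := by
  intro fB
  induction fB with
  | zero => intro fr v tm fA r _ hB; simp [pvLoopB] at hB
  | succ fB ih =>
    intro fr v tm fA r hA hB
    match fr with
    | [] =>
      match fA with
      | 0 => simp [pvLoopA] at hA
      | fA + 1 =>
        simp only [List.map_nil, pvLoopA] at hA
        simpa [pvLoopB] using hA
    | c :: fr =>
      have hwl := pvWithinLevel maze tX tY rows cols (c :: fr) [] v tm fA r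
        (by simpa using hA)
      rw [pvLoopB] at hB ⊢
      by_cases ht : (c :: fr).any (fun c => decide (c.1 = tX ∧ c.2 = tY)) = true
      · rw [if_pos ht] at hB ⊢
        rcases hwl with ⟨_, rfl⟩ | ⟨hnt, _⟩
        · rfl
        · exfalso
          obtain ⟨d, hd, hdt⟩ := List.any_eq_true.mp ht
          exact hnt d hd (of_decide_eq_true hdt)
      · rw [if_neg ht] at hB ⊢
        rcases hwl with ⟨⟨d, hd, hdt⟩, _⟩ | ⟨hnt, hrec⟩
        · exfalso
          exact ht (List.any_eq_true.mpr ⟨d, hd, decide_eq_true hdt⟩)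
        · exact ih _ _ _ _ r (by simpa [pvExpandLevel] using hrec) hB

-- ===== VERDICT (by name: the statement is the Claim_ definition above) =====
theorem flood_fill_time_spec : Claim_equal_flood_fill_time := by
  intro maze sX sY tX tY _ hpre
  unfold Spec_flood_fill_time
  obtain ⟨hne, hrect, h1, h2, h3, h4⟩ := hpre
  have hG : ((maze.length : Int)).toNat * (((maze.headD []).length : Int)).toNat
      = maze.length * (maze.headD []).length := by simp
  set wX : Int := if sX < 0 then sX + (maze.length : Int) else sX with hwX
  set wY : Int := if sY < 0 then sY + ((maze.headD []).length : Int) else sY with hwY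
  have hgrid : ∀ c ∈ [(wX, wY)], pvInGrid (maze.length : Int) ((maze.headD []).length : Int) c := by
    intro c hc
    simp only [List.mem_singleton] at hc
    subst hc
    refine ⟨?_, ?_, ?_, ?_⟩ <;> simp only [hwX, hwY] <;> split_ifs <;> omega
  have hAs := pvLoopA_total maze tX tY (maze.length : Int) ((maze.headD []).length : Int)
    (maze.length * (maze.headD []).length + 2) [(sX, sY, 0)] [(wX, wY)]
    (by simp) hgrid (by simp only [List.length_cons, List.length_nil, hG]; omega)
  obtain ⟨r, hr⟩ := Option.isSome_iff_exists.mp hAs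
  have hBs := pvLoopB_total maze tX tY (maze.length : Int) ((maze.headD []).length : Int)
    (maze.length * (maze.headD []).length + 2) [(sX, sY)] [(wX, wY)] 0
    (by simp) hgrid (by simp only [List.length_cons, List.length_nil, hG]; omega)
  have hB := pvAtoB maze tX tY (maze.length : Int) ((maze.headD []).length : Int)
    (maze.length * (maze.headD []).length + 2) [(sX, sY)] [(wX, wY)] 0
    (maze.length * (maze.headD []).length + 2) r (by simpa using hr) hBs
  show (match pvLoopA maze tX tY (maze.length : Int) ((maze.headD []).length : Int)
      (maze.length * (maze.headD []).length + 2) [(sX, sY, 0)] [(wX, wY)] with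
    | some r => r | none => -1)
    = (match pvLoopB maze tX tY (maze.length : Int) ((maze.headD []).length : Int)
      (maze.length * (maze.headD []).length + 2) [(sX, sY)] [(wX, wY)] 0 with
    | some r => r | none => -1)
  rw [hr, hB]
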